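-- pv_equiv track=rewrite | github.com/pemsley/aceDRG | acedrg/chem.py | confirmAAandNames
-- ===== SOURCE A (Python) =====
-- def confirmAAandNames(tAtoms, tBonds):
--
--     lAA = False
--     atomLinks = {}
--     baseAtomIds = []
--     atomDicts   = {}
--     hAtomNameMap = {}
--     hBondNameMap = {}
--     # Check AA atoms exist
--     i=0
--     for aAtom in tAtoms:
--         atomDicts[aAtom["_chem_comp_atom.atom_id"]] =i
--         i = i+1
--         if "_chem_comp_atom.atom_id" in aAtom.keys() and\
--            "_chem_comp_atom.type_symbol" in aAtom.keys():
--             # Check CA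
--             if aAtom["_chem_comp_atom.atom_id"].strip().upper()== "CA"\
--                and aAtom["_chem_comp_atom.type_symbol"].strip().upper()=="C":
--                 baseAtomIds.append("CA")
--             elif aAtom["_chem_comp_atom.atom_id"].strip().upper()== "C"\
--                and aAtom["_chem_comp_atom.type_symbol"].strip().upper()=="C":
--                 baseAtomIds.append("C")
--             elif aAtom["_chem_comp_atom.atom_id"].strip().upper()== "O"\
--                and aAtom["_chem_comp_atom.type_symbol"].strip().upper()=="O":
--                 baseAtomIds.append("O")
--             elif aAtom["_chem_comp_atom.atom_id"].strip().upper()== "OXT"\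
--                and aAtom["_chem_comp_atom.type_symbol"].strip().upper()=="O":
--                 baseAtomIds.append("OXT")
--             elif aAtom["_chem_comp_atom.atom_id"].strip().upper()== "N"\
--                and aAtom["_chem_comp_atom.type_symbol"].strip().upper()=="N":
--                 baseAtomIds.append("N")
--     # Check connections
--     if len(baseAtomIds)==5 and "CA" in baseAtomIds and "C" in baseAtomIds\
--        and "O" in baseAtomIds and "OXT" in baseAtomIds and "N" in baseAtomIds:
--         for aAId in baseAtomIds:
--             atomLinks[aAId] = []
--             for aBond in tBonds:
--                 if "_chem_comp_bond.atom_id_1" in aBond.keys() and\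
--                    "_chem_comp_bond.atom_id_2" in aBond.keys():
--                     if aBond["_chem_comp_bond.atom_id_1"].strip().upper()==aAId:
--                         atomLinks[aAId].append(aBond["_chem_comp_bond.atom_id_2"])
--                     elif aBond["_chem_comp_bond.atom_id_2"].strip().upper()==aAId:
--                         atomLinks[aAId].append(aBond["_chem_comp_bond.atom_id_1"])
--         if "N" in atomLinks["CA"] and "C" in atomLinks["CA"] and len(atomLinks["CA"])==4\
--            and "O" in atomLinks["C"] and "OXT" in atomLinks["C"] and len(atomLinks["C"])==3\
--            and (len(atomLinks["N"])==2 or len(atomLinks["N"])==3):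
--             lAA = True
--             # Check and change if required
--             hAtomNameMap["CA"]= []
--             for aId in atomLinks["CA"]:
--                 if tAtoms[atomDicts[aId]]["_chem_comp_atom.type_symbol"]=="H":
--                     hAtomNameMap["CA"].append(tAtoms[atomDicts[aId]]["_chem_comp_atom.atom_id"])
--             if len(hAtomNameMap["CA"]) !=1:
--                 lAA = False
--             elif hAtomNameMap["CA"][0] != "HA":
--                 lAA = False
--
--             hAtomNameMap["N"]= []
--             for aId in atomLinks["N"]:
--                 if tAtoms[atomDicts[aId]]["_chem_comp_atom.type_symbol"]=="H":
--                     hAtomNameMap["N"].append(tAtoms[atomDicts[aId]]["_chem_comp_atom.atom_id"])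
--             if len(atomLinks["N"])==3:
--                 if len(hAtomNameMap["N"]) ==0 or len(hAtomNameMap["N"])> 2 :
--                     lAA = False
--                 else:
--                     if len(hAtomNameMap["N"]) ==1 :
--                         if not "H2" in hAtomNameMap["N"] :
--                             lAA = False
--                     else:
--                         if not "H" in hAtomNameMap["N"] or not "H2" in hAtomNameMap["N"]:
--                             lAA = False
--
--             elif len(atomLinks["N"])==4:
--                 if len(hAtomNameMap["N"]) != 3  :
--                     lAA = False
--                 else:
--                     if not "H" in hAtomNameMap["N"] or not "H2" in hAtomNameMap["N"] or not "H3" in hAtomNameMap["N"]: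
--                         lAA = False
--         else:
--             lAA = False
--     else:
--         lAA = False
--     return lAA
-- ===== SOURCE B (Python) =====
-- AID  = "_chem_comp_atom.atom_id"
-- TSYM = "_chem_comp_atom.type_symbol"
-- B1   = "_chem_comp_bond.atom_id_1"
-- B2   = "_chem_comp_bond.atom_id_2"
--
-- # expected type_symbol for each backbone atom name
-- SPEC = {"CA": "C", "C": "C", "O": "O", "OXT": "O", "N": "N"}
--
--
-- def confirmAAandNames(tAtoms, tBonds):
--     # Pass 1: atom-id -> row index (last wins), plus the matched backbone names.
--     index = {}
--     names = []
--     for i, a in enumerate(tAtoms):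
--         index[a[AID]] = i
--         if TSYM in a:
--             u = a[AID].strip().upper()
--             if SPEC.get(u) == a[TSYM].strip().upper():
--                 names.append(u)
--     # the backbone gate: exactly one of each of the five names
--     if sorted(names) != ["C", "CA", "N", "O", "OXT"]:
--         return False
--     # Pass 2: stream the bonds into scalar statistics (no adjacency lists),
--     # resolving hydrogen neighbours of CA and N on the fly.
--     caDeg = caN = caC = caH = caHA = 0
--     cDeg = cO = cOXT = 0
--     nDeg = nH = 0
--     nHasH = nHasH2 = False
--     for b in tBonds:
--         if B1 in b and B2 in b:
--             r1, r2 = b[B1], b[B2]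
--             u1, u2 = r1.strip().upper(), r2.strip().upper()
--             touches = [(u1, r2)]
--             if u2 != u1:
--                 touches.append((u2, r1))
--             for key, raw in touches:
--                 if key == "CA":
--                     caDeg += 1
--                     caN += raw == "N"
--                     caC += raw == "C"
--                     j = index.get(raw)
--                     if j is not None and tAtoms[j].get(TSYM) == "H":
--                         caH += 1
--                         caHA += tAtoms[j].get(AID) == "HA"
--                 elif key == "C":
--                     cDeg += 1
--                     cO += raw == "O"
--                     cOXT += raw == "OXT"
--                 elif key == "N":
--                     nDeg += 1
--                     j = index.get(raw)
--                     if j is not None and tAtoms[j].get(TSYM) == "H":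
--                         nH += 1
--                         nHasH = nHasH or tAtoms[j].get(AID) == "H"
--                         nHasH2 = nHasH2 or tAtoms[j].get(AID) == "H2"
--     if not (caN and caC and caDeg == 4 and cO and cOXT and cDeg == 3
--             and nDeg in (2, 3)):
--         return False
--     if not (caH == 1 and caHA == 1):
--         return False
--     if nDeg == 3:
--         return (nH == 1 and nHasH2) or (nH == 2 and nHasH and nHasH2)
--     return True
-- ===== Notes on version B (the rewrite author's own statement) =====
-- stated objective: alternative
-- what changed: B replaces A's appended baseAtomIds list and five membership tests by a table-driven (SPEC dict) match plus a sort-against-literal gate, and replaces A's five full rescans of tBonds building adjacency lists (later re-walked to collect H names) by one streaming pass over tBonds that keeps only scalar counters/flags (degrees, raw-id hits, H-neighbour counts resolved on the fly), so no per-atom neighbour lists are ever built.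
import Mathlib
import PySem

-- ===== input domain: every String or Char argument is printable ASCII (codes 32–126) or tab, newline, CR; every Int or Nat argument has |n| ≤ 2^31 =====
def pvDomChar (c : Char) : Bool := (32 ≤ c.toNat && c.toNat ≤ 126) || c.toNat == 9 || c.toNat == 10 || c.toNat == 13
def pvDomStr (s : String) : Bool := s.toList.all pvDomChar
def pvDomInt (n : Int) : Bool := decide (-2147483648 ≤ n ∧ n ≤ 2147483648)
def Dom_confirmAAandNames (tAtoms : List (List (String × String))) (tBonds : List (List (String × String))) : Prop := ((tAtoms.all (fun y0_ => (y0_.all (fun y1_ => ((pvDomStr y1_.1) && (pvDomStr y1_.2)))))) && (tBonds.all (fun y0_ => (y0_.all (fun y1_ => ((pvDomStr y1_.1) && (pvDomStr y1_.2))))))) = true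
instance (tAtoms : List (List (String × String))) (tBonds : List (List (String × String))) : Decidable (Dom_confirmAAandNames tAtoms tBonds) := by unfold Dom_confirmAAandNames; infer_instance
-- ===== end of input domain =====

-- B replaces A's appended-name list + five membership tests by a sort-against-literal gate,
-- and A's five full rescans of tBonds building adjacency lists (plus later H-name passes) by one
-- streaming pass keeping only scalar counters/flags, resolving H neighbours of CA and N on the fly.

-- shared constants and dict-access helpers (a Python dict argument is an association list; lookup = first match)
def pvAID : String := "_chem_comp_atom.atom_id"
def pvTSYM : String := "_chem_comp_atom.type_symbol"
def pvB1 : String := "_chem_comp_bond.atom_id_1"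
def pvB2 : String := "_chem_comp_bond.atom_id_2"
def dget (l : List (String × String)) (k : String) : Option String := (PySem.Dict.mk l).get? k
def dhas (l : List (String × String)) (k : String) : Bool := (PySem.Dict.mk l).contains k
-- s.strip().upper()
def su (s : String) : String := PySem.Str.upper (PySem.Str.strip s)
-- tAtoms[atomDicts[aId]]["_chem_comp_atom.type_symbol"]  (none exactly where Python raises; Pre_ excludes those)
def atomTypeAt (index : PySem.Dict String Int) (tAtoms : List (List (String × String))) (aId : String) : Option String :=
  ((index.get? aId).bind (fun i => PySem.List.pyGet? tAtoms i)).bind (fun a => dget a pvTSYM)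
-- tAtoms[atomDicts[aId]]["_chem_comp_atom.atom_id"]  (getD "" unreachable under Pre_)
def atomNameAt (index : PySem.Dict String Int) (tAtoms : List (List (String × String))) (aId : String) : String :=
  (((index.get? aId).bind (fun i => PySem.List.pyGet? tAtoms i)).bind (fun a => dget a pvAID)).getD ""

-- ===== PORT A =====
-- first loop: atomDicts, i, baseAtomIds
def aAtomStep (s : PySem.Dict String Int × Int × List String) (aAtom : List (String × String)) :
    PySem.Dict String Int × Int × List String :=
  let atomDicts := s.1.insert ((dget aAtom pvAID).getD "") s.2.1
  let i := s.2.1 + 1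
  let base :=
    if dhas aAtom pvAID && dhas aAtom pvTSYM then
      if su ((dget aAtom pvAID).getD "") == "CA" && su ((dget aAtom pvTSYM).getD "") == "C" then s.2.2 ++ ["CA"]
      else if su ((dget aAtom pvAID).getD "") == "C" && su ((dget aAtom pvTSYM).getD "") == "C" then s.2.2 ++ ["C"]
      else if su ((dget aAtom pvAID).getD "") == "O" && su ((dget aAtom pvTSYM).getD "") == "O" then s.2.2 ++ ["O"]
      else if su ((dget aAtom pvAID).getD "") == "OXT" && su ((dget aAtom pvTSYM).getD "") == "O" then s.2.2 ++ ["OXT"]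
      else if su ((dget aAtom pvAID).getD "") == "N" && su ((dget aAtom pvTSYM).getD "") == "N" then s.2.2 ++ ["N"]
      else s.2.2
    else s.2.2
  (atomDicts, i, base)

-- inner bond loop body for one base id aAId
def aBondStep (aAId : String) (acc : List String) (aBond : List (String × String)) : List String :=
  if dhas aBond pvB1 && dhas aBond pvB2 then
    if su ((dget aBond pvB1).getD "") == aAId then acc ++ [(dget aBond pvB2).getD ""]
    else if su ((dget aBond pvB2).getD "") == aAId then acc ++ [(dget aBond pvB1).getD ""]
    else acc
  else acc

def confirmAAandNames (tAtoms : List (List (String × String))) (tBonds : List (List (String × String))) : Bool :=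
  let s := tAtoms.foldl aAtomStep (PySem.Dict.empty, 0, [])
  let atomDicts := s.1
  let baseAtomIds := s.2.2
  if baseAtomIds.length == 5 && baseAtomIds.contains "CA" && baseAtomIds.contains "C"
      && baseAtomIds.contains "O" && baseAtomIds.contains "OXT" && baseAtomIds.contains "N" then
    let atomLinks := baseAtomIds.foldl
      (fun al aAId => al.insert aAId (tBonds.foldl (aBondStep aAId) [])) PySem.Dict.empty
    let lca := (atomLinks.get? "CA").getD []   -- atomLinks["CA"]: key present whenever this branch runs
    let lc := (atomLinks.get? "C").getD []
    let ln := (atomLinks.get? "N").getD []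
    if lca.contains "N" && lca.contains "C" && lca.length == 4
        && lc.contains "O" && lc.contains "OXT" && lc.length == 3
        && (ln.length == 2 || ln.length == 3) then
      let hca := lca.foldl (fun acc aId =>
        if atomTypeAt atomDicts tAtoms aId == some "H" then acc ++ [atomNameAt atomDicts tAtoms aId] else acc) []
      let lAA1 : Bool :=
        if hca.length ≠ 1 then false
        else if (PySem.List.pyGet? hca 0).getD "" ≠ "HA" then false
        else true
      let hn := ln.foldl (fun acc aId =>
        if atomTypeAt atomDicts tAtoms aId == some "H" then acc ++ [atomNameAt atomDicts tAtoms aId] else acc) []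
      if ln.length == 3 then
        if hn.length = 0 ∨ hn.length > 2 then false
        else if hn.length = 1 then (if !hn.contains "H2" then false else lAA1)
        else if !hn.contains "H" || !hn.contains "H2" then false else lAA1
      else if ln.length == 4 then
        if hn.length ≠ 3 then false
        else if !hn.contains "H" || !hn.contains "H2" || !hn.contains "H3" then false else lAA1
      else lAA1
    else false
  else false

-- ===== PORT B =====
-- SPEC: expected type_symbol for each backbone atom name
def bSpec : PySem.Dict String String :=
  PySem.Dict.mk [("CA", "C"), ("C", "C"), ("O", "O"), ("OXT", "O"), ("N", "N")]

-- pass 1 body: index (last wins) and the matched backbone names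
def bAtomStep (s : PySem.Dict String Int × List String) (p : Int × List (String × String)) :
    PySem.Dict String Int × List String :=
  let index := s.1.insert ((dget p.2 pvAID).getD "") p.1
  if dhas p.2 pvTSYM then
    let u := su ((dget p.2 pvAID).getD "")
    if bSpec.get? u == some (su ((dget p.2 pvTSYM).getD "")) then (index, s.2 ++ [u])
    else (index, s.2)
  else (index, s.2)

structure BStats where
  caDeg : Int
  caN : Int
  caC : Int
  caH : Int
  caHA : Int
  cDeg : Int
  cO : Int
  cOXT : Int
  nDeg : Int
  nH : Int
  nHasH : Bool
  nHasH2 : Bool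
  deriving Repr, DecidableEq

def bStats0 : BStats := ⟨0, 0, 0, 0, 0, 0, 0, 0, 0, 0, false, false⟩

-- dispatch of one (key, raw-neighbour) touch event into the scalar statistics
def bTouch (index : PySem.Dict String Int) (tAtoms : List (List (String × String)))
    (st : BStats) (p : String × String) : BStats :=
  if p.1 == "CA" then
    let st := { st with caDeg := st.caDeg + 1,
                        caN := st.caN + (if p.2 == "N" then 1 else 0),
                        caC := st.caC + (if p.2 == "C" then 1 else 0) }
    if atomTypeAt index tAtoms p.2 == some "H" then
      { st with caH := st.caH + 1,
                caHA := st.caHA + (if atomNameAt index tAtoms p.2 == "HA" then 1 else 0) }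
    else st
  else if p.1 == "C" then
    { st with cDeg := st.cDeg + 1,
              cO := st.cO + (if p.2 == "O" then 1 else 0),
              cOXT := st.cOXT + (if p.2 == "OXT" then 1 else 0) }
  else if p.1 == "N" then
    let st := { st with nDeg := st.nDeg + 1 }
    if atomTypeAt index tAtoms p.2 == some "H" then
      { st with nH := st.nH + 1,
                nHasH := st.nHasH || (atomNameAt index tAtoms p.2 == "H"),
                nHasH2 := st.nHasH2 || (atomNameAt index tAtoms p.2 == "H2") }
    else st
  else st

-- pass 2 body: one bond contributes one or two touch events
def bBondStep (index : PySem.Dict String Int) (tAtoms : List (List (String × String)))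
    (st : BStats) (aBond : List (String × String)) : BStats :=
  if dhas aBond pvB1 && dhas aBond pvB2 then
    let r1 := (dget aBond pvB1).getD ""
    let r2 := (dget aBond pvB2).getD ""
    let u1 := su r1
    let u2 := su r2
    let touches := [(u1, r2)] ++ (if u2 ≠ u1 then [(u2, r1)] else [])
    touches.foldl (bTouch index tAtoms) st
  else st

def confirmAAandNames_alt (tAtoms : List (List (String × String))) (tBonds : List (List (String × String))) : Bool :=
  let s := (PySem.List.enumerate tAtoms 0).foldl bAtomStep (PySem.Dict.empty, [])
  if PySem.List.sorted s.2 (fun x => x) false ≠ ["C", "CA", "N", "O", "OXT"] then false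
  else
    let st := tBonds.foldl (bBondStep s.1 tAtoms) bStats0
    if !(st.caN ≠ 0 && st.caC ≠ 0 && st.caDeg == 4 && st.cO ≠ 0 && st.cOXT ≠ 0 && st.cDeg == 3
        && (st.nDeg == 2 || st.nDeg == 3)) then false
    else if !(st.caH == 1 && st.caHA == 1) then false
    else if st.nDeg == 3 then
      (st.nH == 1 && st.nHasH2) || (st.nH == 2 && st.nHasH && st.nHasH2)
    else true

-- ===== PRECONDITION & SPEC =====
-- the atom id of an atom row (all atoms carry pvAID under Pre_, so the default is never used)
def aidOf (a : List (String × String)) : String := ((PySem.Dict.mk a).get? pvAID).getD ""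
-- the atom row A's atomDicts[r] lookup lands on: the LAST atom whose id is r; it must exist and carry a type_symbol
def neighborOK (tAtoms : List (List (String × String))) (r : String) : Bool :=
  match (tAtoms.filter (fun a => aidOf a == r)).getLast? with
  | some a => (PySem.Dict.mk a).contains pvTSYM
  | none => false
-- the five backbone atoms are present with the right types and are exactly five (A's first gate)
def gate1 (tAtoms : List (List (String × String))) : Bool :=
  let cnt := fun (u t : String) => tAtoms.countP (fun a =>
    dhas a pvAID && dhas a pvTSYM && (su ((dget a pvAID).getD "") == u) && (su ((dget a pvTSYM).getD "") == t))
  (cnt "CA" "C" + cnt "C" "C" + cnt "O" "O" + cnt "OXT" "O" + cnt "N" "N" == 5)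
    && cnt "CA" "C" ≠ 0 && cnt "C" "C" ≠ 0 && cnt "O" "O" ≠ 0 && cnt "OXT" "O" ≠ 0 && cnt "N" "N" ≠ 0
-- every raw neighbour id a bond attaches to CA or N must resolve to an atom with a type_symbol
def bondOK (tAtoms : List (List (String × String))) (b : List (String × String)) : Bool :=
  if dhas b pvB1 && dhas b pvB2 then
    let u1 := su ((dget b pvB1).getD "")
    let u2 := su ((dget b pvB2).getD "")
    (!(u1 == "CA" || u1 == "N") || neighborOK tAtoms ((dget b pvB2).getD ""))
      && (!((u2 == "CA" && u1 != "CA") || (u2 == "N" && u1 != "N")) || neighborOK tAtoms ((dget b pvB1).getD ""))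
  else true
-- connectivity of A's second gate, stated in closed form over the bonds (no fold of the ports):
-- a valid bond contributes exactly one neighbour to key k iff one of its stripped/upper endpoints is k
def validB (b : List (String × String)) : Bool := dhas b pvB1 && dhas b pvB2
def bu1 (b : List (String × String)) : String := su ((dget b pvB1).getD "")
def bu2 (b : List (String × String)) : String := su ((dget b pvB2).getD "")
def keyDeg (tBonds : List (List (String × String))) (k : String) : Nat :=
  tBonds.countP (fun b => validB b && (bu1 b == k || bu2 b == k))
def keyHasRaw (tBonds : List (List (String × String))) (k x : String) : Bool :=
  tBonds.any (fun b => validB b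
    && ((bu1 b == k && (dget b pvB2).getD "" == x)
      || (bu2 b == k && bu1 b != k && (dget b pvB1).getD "" == x)))
def gate2 (tBonds : List (List (String × String))) : Bool :=
  keyHasRaw tBonds "CA" "N" && keyHasRaw tBonds "CA" "C" && keyDeg tBonds "CA" == 4
    && keyHasRaw tBonds "C" "O" && keyHasRaw tBonds "C" "OXT" && keyDeg tBonds "C" == 3
    && (keyDeg tBonds "N" == 2 || keyDeg tBonds "N" == 3)
-- Pre_ excludes exactly the inputs where Python A raises a KeyError: an atom row without an atom_id key,
-- or (both backbone gates passing) a CA/N bond whose raw neighbour id has no atom row with a type_symbol.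
def Pre_confirmAAandNames (tAtoms : List (List (String × String))) (tBonds : List (List (String × String))) : Prop :=
  ((tAtoms.all (fun a => dhas a pvAID))
    && (!(gate1 tAtoms && gate2 tBonds) || tBonds.all (bondOK tAtoms))) = true
instance (tAtoms : List (List (String × String))) (tBonds : List (List (String × String))) : Decidable (Pre_confirmAAandNames tAtoms tBonds) := by unfold Pre_confirmAAandNames; infer_instance
def pvWitness_confirmAAandNames : (List (List (String × String))) × (List (List (String × String))) := ([], [])
def Spec_confirmAAandNames (tAtoms : List (List (String × String))) (tBonds : List (List (String × String))) (out : Bool) : Prop := out = confirmAAandNames_alt tAtoms tBonds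
instance (tAtoms : List (List (String × String))) (tBonds : List (List (String × String))) (out : Bool) : Decidable (Spec_confirmAAandNames tAtoms tBonds out) := by unfold Spec_confirmAAandNames; infer_instance

-- ===== CLAIM (what is proved, stated in full; the proofs are below) =====
def Claim_equal_confirmAAandNames : Prop := ∀ (tAtoms : List (List (String × String))) (tBonds : List (List (String × String))), Dom_confirmAAandNames tAtoms tBonds → Pre_confirmAAandNames tAtoms tBonds → Spec_confirmAAandNames tAtoms tBonds (confirmAAandNames tAtoms tBonds)

-- ===== LEMMAS AND PROOFS =====

def fiveNames : List String := ["CA", "C", "O", "OXT", "N"]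

-- A's first-loop state and B's coincide (B carries no counter; enumerate supplies it)
theorem spec_chain (u ts : String) (base : List String) :
    (if bSpec.get? u == some ts then base ++ [u] else base)
      = (if u == "CA" && ts == "C" then base ++ ["CA"]
         else if u == "C" && ts == "C" then base ++ ["C"]
         else if u == "O" && ts == "O" then base ++ ["O"]
         else if u == "OXT" && ts == "O" then base ++ ["OXT"]
         else if u == "N" && ts == "N" then base ++ ["N"]
         else base) := by
  by_cases h1 : u = "CA"
  · subst h1
    by_cases ht : ts = "C"
    · simp [ht, bSpec, PySem.Dict.get?_mk_cons]
    · simp [ht, Ne.symm ht, bSpec, PySem.Dict.get?_mk_cons]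
  · by_cases h2 : u = "C"
    · subst h2
      by_cases ht : ts = "C"
      · simp [ht, bSpec, PySem.Dict.get?_mk_cons]
      · simp [ht, Ne.symm ht, bSpec, PySem.Dict.get?_mk_cons]
    · by_cases h3 : u = "O"
      · subst h3
        by_cases ht : ts = "O"
        · simp [ht, bSpec, PySem.Dict.get?_mk_cons]
        · simp [ht, Ne.symm ht, bSpec, PySem.Dict.get?_mk_cons]
      · by_cases h4 : u = "OXT"
        · subst h4
          by_cases ht : ts = "O"
          · simp [ht, bSpec, PySem.Dict.get?_mk_cons]
          · simp [ht, Ne.symm ht, bSpec, PySem.Dict.get?_mk_cons]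
        · by_cases h5 : u = "N"
          · subst h5
            by_cases ht : ts = "N"
            · simp [ht, bSpec, PySem.Dict.get?_mk_cons]
            · simp [ht, Ne.symm ht, bSpec, PySem.Dict.get?_mk_cons]
          · have hn : bSpec.get? u = none := by
              rw [bSpec, PySem.Dict.get?_mk_cons, if_neg (by simp only [beq_iff_eq]; exact fun h => h1 h.symm),
                PySem.Dict.get?_mk_cons, if_neg (by simp only [beq_iff_eq]; exact fun h => h2 h.symm),
                PySem.Dict.get?_mk_cons, if_neg (by simp only [beq_iff_eq]; exact fun h => h3 h.symm),
                PySem.Dict.get?_mk_cons, if_neg (by simp only [beq_iff_eq]; exact fun h => h4 h.symm),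
                PySem.Dict.get?_mk_cons, if_neg (by simp only [beq_iff_eq]; exact fun h => h5 h.symm)]
              rfl
            simp [hn, h1, h2, h3, h4, h5]

theorem atomStep_eq (t : PySem.Dict String Int × Int × List String) (a : List (String × String)) :
    bAtomStep (t.1, t.2.2) (t.2.1, a) = ((aAtomStep t a).1, (aAtomStep t a).2.2) := by
  simp only [bAtomStep, aAtomStep]
  by_cases hT : dhas a pvTSYM = true
  · by_cases hA : dhas a pvAID = true
    · rw [if_pos hT]
      have hg : (dhas a pvAID && dhas a pvTSYM) = true := by rw [hA, hT]; rfl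
      rw [hg, if_pos rfl, ← spec_chain]
      split_ifs <;> rfl
    · have hnone : dget a pvAID = none := by
        have h' := PySem.Dict.contains_eq_isSome_get? (d := PySem.Dict.mk a) (k := pvAID)
        rw [dget, ← Option.not_isSome_iff_eq_none]
        simp only [dhas, Bool.not_eq_true] at hA
        rw [hA] at h'
        simp [← h']
      have hb : bSpec.get? (su ((dget a pvAID).getD "")) = none := by rw [hnone]; decide
      simp [hT, hA, hb]
  · simp [hT]

theorem atomLoop_eq (atoms : List (List (String × String)))
    (t : PySem.Dict String Int × Int × List String) :
    (PySem.List.enumerate atoms t.2.1).foldl bAtomStep (t.1, t.2.2)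
      = ((atoms.foldl aAtomStep t).1, (atoms.foldl aAtomStep t).2.2) := by
  induction atoms generalizing t with
  | nil => simp [PySem.List.enumerate_nil]
  | cons a atoms ih =>
    have hi : (aAtomStep t a).2.1 = t.2.1 + 1 := rfl
    simp only [List.foldl_cons, PySem.List.enumerate_cons, atomStep_eq t a]
    have := ih (aAtomStep t a)
    rwa [hi] at this

-- every name A appends is one of the five backbone names
theorem base_mem (atoms : List (List (String × String)))
    (t : PySem.Dict String Int × Int × List String)
    (h : ∀ x ∈ t.2.2, x ∈ fiveNames) :
    ∀ x ∈ (atoms.foldl aAtomStep t).2.2, x ∈ fiveNames := by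
  induction atoms generalizing t with
  | nil => exact h
  | cons a atoms ih =>
    refine ih (aAtomStep t a) ?_
    intro x hx
    simp only [aAtomStep] at hx
    split_ifs at hx <;> first
      | exact h x hx
      | (rcases List.mem_append.mp hx with hx | hx
         · exact h x hx
         · simp only [List.mem_singleton] at hx; subst hx; decide)

theorem length_eq_sum_counts (l : List String) (h : ∀ x ∈ l, x ∈ fiveNames) :
    l.length = l.count "CA" + l.count "C" + l.count "O" + l.count "OXT" + l.count "N" := by
  induction l with
  | nil => rfl
  | cons x xs ih =>
    have hx := h x (List.mem_cons_self ..)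
    have hxs := ih (fun y hy => h y (List.mem_cons_of_mem _ hy))
    simp only [fiveNames, List.mem_cons, List.not_mem_nil, or_false] at hx
    rcases hx with hx | hx | hx | hx | hx <;> subst hx <;>
      simp [hxs] <;> omega

-- the sort-against-literal gate equals A's length-and-membership gate
theorem perm_gate (l : List String) (h : ∀ x ∈ l, x ∈ fiveNames) :
    l.Perm ["C", "CA", "N", "O", "OXT"]
      ↔ (l.length = 5 ∧ "CA" ∈ l ∧ "C" ∈ l ∧ "O" ∈ l ∧ "OXT" ∈ l ∧ "N" ∈ l) := by
  constructor
  · intro hp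
    refine ⟨by simpa using hp.length_eq, ?_, ?_, ?_, ?_, ?_⟩ <;>
      · rw [hp.mem_iff]; decide
  · rintro ⟨hl, m1, m2, m3, m4, m5⟩
    have c1 : 1 ≤ l.count "CA" := List.one_le_count_iff.mpr m1
    have c2 : 1 ≤ l.count "C" := List.one_le_count_iff.mpr m2
    have c3 : 1 ≤ l.count "O" := List.one_le_count_iff.mpr m3
    have c4 : 1 ≤ l.count "OXT" := List.one_le_count_iff.mpr m4
    have c5 : 1 ≤ l.count "N" := List.one_le_count_iff.mpr m5
    have hsum := length_eq_sum_counts l h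
    rw [List.perm_iff_count]
    intro a
    by_cases a1 : a = "CA"
    · subst a1; simp only [hl] at hsum; rw [show (["C", "CA", "N", "O", "OXT"].count "CA") = 1 from rfl]; omega
    · by_cases a2 : a = "C"
      · subst a2; simp only [hl] at hsum; rw [show (["C", "CA", "N", "O", "OXT"].count "C") = 1 from rfl]; omega
      · by_cases a3 : a = "O"
        · subst a3; simp only [hl] at hsum; rw [show (["C", "CA", "N", "O", "OXT"].count "O") = 1 from rfl]; omega
        · by_cases a4 : a = "OXT"
          · subst a4; simp only [hl] at hsum; rw [show (["C", "CA", "N", "O", "OXT"].count "OXT") = 1 from rfl]; omega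
          · by_cases a5 : a = "N"
            · subst a5; simp only [hl] at hsum; rw [show (["C", "CA", "N", "O", "OXT"].count "N") = 1 from rfl]; omega
            · have hnl : a ∉ l := fun hm => by
                have := h a hm
                simp only [fiveNames, List.mem_cons, List.not_mem_nil, or_false] at this
                tauto
              have hnr : a ∉ (["C", "CA", "N", "O", "OXT"] : List String) := by
                simp only [List.mem_cons, List.not_mem_nil, or_false]
                tauto
              rw [List.count_eq_zero.mpr hnl, List.count_eq_zero.mpr hnr]

theorem gate_eq (l : List String) (h : ∀ x ∈ l, x ∈ fiveNames) :
    (PySem.List.sorted l (fun x => x) false = ["C", "CA", "N", "O", "OXT"])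
      ↔ (l.length = 5 ∧ "CA" ∈ l ∧ "C" ∈ l ∧ "O" ∈ l ∧ "OXT" ∈ l ∧ "N" ∈ l) := by
  rw [← perm_gate l h]
  constructor
  · intro hs
    exact hs ▸ (PySem.List.sorted_perm l (fun x => x) false).symm
  · intro hp
    refine PySem.List.sorted_eq_of_perm_of_pairwise_lt l _ (fun x => x) hp.symm ?_
    simp [List.pairwise_cons, String.lt_iff_toList_lt]
    refine ⟨⟨?_, ?_, ?_⟩, ⟨?_, ?_, ?_⟩, ?_, ?_⟩ <;> decide

theorem foldl_insert_get (f : String → List String) (ks : List String)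
    (d : PySem.Dict String (List String)) (k : String) :
    (ks.foldl (fun al a => al.insert a (f a)) d).get? k
      = if k ∈ ks then some (f k) else d.get? k := by
  induction ks generalizing d with
  | nil => simp
  | cons a ks ih =>
    simp only [List.foldl_cons, ih, List.mem_cons]
    by_cases hks : k ∈ ks
    · simp [hks]
    · by_cases hka : k = a
      · subst hka; simp [hks, PySem.Dict.get?_insert_self]
      · simp [hks, PySem.Dict.get?_insert, hka]

-- H-neighbour names of a neighbour list, as A's fold computes them
def bHnames (index : PySem.Dict String Int) (tAtoms : List (List (String × String))) (ids : List String) : List String :=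
  (ids.filter (fun x => atomTypeAt index tAtoms x == some "H")).map (fun x => atomNameAt index tAtoms x)

-- B's scalar statistics as a function of A's three neighbour lists
def bondMeasure (index : PySem.Dict String Int) (tAtoms : List (List (String × String)))
    (t : List String × List String × List String) : BStats :=
  { caDeg := (t.1.length : Int), caN := (t.1.count "N" : Int), caC := (t.1.count "C" : Int),
    caH := ((bHnames index tAtoms t.1).length : Int),
    caHA := ((bHnames index tAtoms t.1).count "HA" : Int),
    cDeg := (t.2.1.length : Int), cO := (t.2.1.count "O" : Int), cOXT := (t.2.1.count "OXT" : Int),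
    nDeg := (t.2.2.length : Int), nH := ((bHnames index tAtoms t.2.2).length : Int),
    nHasH := (bHnames index tAtoms t.2.2).contains "H",
    nHasH2 := (bHnames index tAtoms t.2.2).contains "H2" }

-- effect of one touch event on one list / on the three lists
def addOne (key k raw : String) (l : List String) : List String :=
  if k = key then l ++ [raw] else l

def addTo (k raw : String) (t : List String × List String × List String) :
    List String × List String × List String :=
  (addOne "CA" k raw t.1, addOne "C" k raw t.2.1, addOne "N" k raw t.2.2)

theorem bHnames_append (index : PySem.Dict String Int) (tAtoms : List (List (String × String)))
    (l : List String) (r : String) :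
    bHnames index tAtoms (l ++ [r])
      = bHnames index tAtoms l
        ++ (if atomTypeAt index tAtoms r == some "H" then [atomNameAt index tAtoms r] else []) := by
  simp only [bHnames, List.filter_append, List.map_append]
  by_cases hr : (atomTypeAt index tAtoms r == some "H") = true <;> simp [hr]

theorem beq_comm_str (a b : String) : (a == b) = decide (b = a) := by
  by_cases h : a = b
  · simp [h]
  · simp [h, Ne.symm h]

theorem touch_measure (index : PySem.Dict String Int) (tAtoms : List (List (String × String)))
    (t : List String × List String × List String) (k raw : String) :
    bTouch index tAtoms (bondMeasure index tAtoms t) (k, raw)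
      = bondMeasure index tAtoms (addTo k raw t) := by
  simp only [bTouch, addTo, addOne, bondMeasure]
  by_cases h1 : k = "CA"
  · subst h1
    by_cases hH : (atomTypeAt index tAtoms raw == some "H") = true
    · have e : bHnames index tAtoms (t.1 ++ [raw])
          = bHnames index tAtoms t.1 ++ [atomNameAt index tAtoms raw] := by
        rw [bHnames_append, if_pos hH]
      by_cases hn : raw = "N" <;> by_cases hc : raw = "C" <;>
        by_cases hha : atomNameAt index tAtoms raw = "HA" <;>
        simp_all [List.count_append, BStats.mk.injEq] <;> omega
    · have e : bHnames index tAtoms (t.1 ++ [raw]) = bHnames index tAtoms t.1 := by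
        rw [bHnames_append, if_neg hH, List.append_nil]
      by_cases hn : raw = "N" <;> by_cases hc : raw = "C" <;>
        simp_all [List.count_append, BStats.mk.injEq] <;> omega
  · by_cases h2 : k = "C"
    · subst h2
      by_cases ho : raw = "O" <;> by_cases hx : raw = "OXT" <;>
        simp_all [List.count_append, BStats.mk.injEq] <;> omega
    · by_cases h3 : k = "N"
      · subst h3
        by_cases hH : (atomTypeAt index tAtoms raw == some "H") = true
        · have e : bHnames index tAtoms (t.2.2 ++ [raw])
              = bHnames index tAtoms t.2.2 ++ [atomNameAt index tAtoms raw] := by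
            rw [bHnames_append, if_pos hH]
          by_cases hh : atomNameAt index tAtoms raw = "H" <;>
            by_cases hh2 : atomNameAt index tAtoms raw = "H2" <;>
            simp_all [List.count_append, BStats.mk.injEq, beq_comm_str] <;> omega
        · have e : bHnames index tAtoms (t.2.2 ++ [raw]) = bHnames index tAtoms t.2.2 := by
            rw [bHnames_append, if_neg hH, List.append_nil]
          simp_all [BStats.mk.injEq] <;> omega
      · simp_all [BStats.mk.injEq]

set_option maxHeartbeats 1000000 in
theorem comp_lemma (k : String) (l : List String) (b : List (String × String))
    (hg : (dhas b pvB1 && dhas b pvB2) = true) :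
    aBondStep k l b
      = (if su ((dget b pvB2).getD "") ≠ su ((dget b pvB1).getD "")
         then addOne k (su ((dget b pvB2).getD "")) ((dget b pvB1).getD "")
                (addOne k (su ((dget b pvB1).getD "")) ((dget b pvB2).getD "") l)
         else addOne k (su ((dget b pvB1).getD "")) ((dget b pvB2).getD "") l) := by
  simp only [aBondStep, hg, if_pos, addOne]
  by_cases e1 : su ((dget b pvB1).getD "") = k
  · by_cases hne : su ((dget b pvB2).getD "") ≠ su ((dget b pvB1).getD "")
    · have e2 : ¬ su ((dget b pvB2).getD "") = k := fun h => hne (h.trans e1.symm)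
      simp [e1, e2, hne]
    · simp [e1, hne]
  · by_cases e2 : su ((dget b pvB2).getD "") = k
    · have hne : su ((dget b pvB2).getD "") ≠ su ((dget b pvB1).getD "") :=
        fun h => e1 (h.symm.trans e2)
      have e3 : ¬ k = su ((dget b pvB1).getD "") := fun h => e1 (h.symm)
      simp [e1, e2, hne, e3]
    · by_cases hne : su ((dget b pvB2).getD "") ≠ su ((dget b pvB1).getD "") <;>
        simp [e1, e2, hne]

set_option maxHeartbeats 1000000 in
theorem bondStep_measure (index : PySem.Dict String Int) (tAtoms : List (List (String × String)))
    (t : List String × List String × List String) (b : List (String × String)) :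
    bBondStep index tAtoms (bondMeasure index tAtoms t) b
      = bondMeasure index tAtoms (aBondStep "CA" t.1 b, aBondStep "C" t.2.1 b, aBondStep "N" t.2.2 b) := by
  by_cases hg : (dhas b pvB1 && dhas b pvB2) = true
  · rw [comp_lemma "CA" t.1 b hg, comp_lemma "C" t.2.1 b hg, comp_lemma "N" t.2.2 b hg]
    unfold bBondStep
    rw [if_pos hg]
    simp only []
    by_cases hne : su ((dget b pvB2).getD "") ≠ su ((dget b pvB1).getD "")
    · rw [if_pos hne, if_pos hne, if_pos hne, if_pos hne]
      simp only [List.cons_append, List.nil_append, List.foldl_cons, List.foldl_nil]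
      rw [touch_measure, touch_measure]
      simp only [addTo]
    · rw [if_neg hne, if_neg hne, if_neg hne, if_neg hne]
      simp only [List.append_nil, List.foldl_cons, List.foldl_nil]
      rw [touch_measure]
      simp only [addTo]
  · unfold bBondStep aBondStep
    rw [if_neg hg, if_neg hg, if_neg hg, if_neg hg]

theorem bondLoop_measure (index : PySem.Dict String Int) (tAtoms : List (List (String × String)))
    (bonds : List (List (String × String))) (t : List String × List String × List String) :
    bonds.foldl (bBondStep index tAtoms) (bondMeasure index tAtoms t)
      = bondMeasure index tAtoms
          (bonds.foldl (aBondStep "CA") t.1, bonds.foldl (aBondStep "C") t.2.1, bonds.foldl (aBondStep "N") t.2.2) := by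
  induction bonds generalizing t with
  | nil => rfl
  | cons b bs ih =>
    simp only [List.foldl_cons, bondStep_measure]
    exact ih _

-- A's CA hydrogen check is "exactly one H neighbour, named HA"
theorem lAA1_eq (h : List String) :
    (if h.length ≠ 1 then false else if (PySem.List.pyGet? h 0).getD "" ≠ "HA" then false else true)
      = ((h.length == 1) && (h.count "HA" == 1)) := by
  match h with
  | [] => simp
  | [a] =>
    by_cases ha : a = "HA"
    · simp [ha, PySem.List.pyGet?, PySem.List.pyIdx?]
    · simp [ha, Ne.symm ha, PySem.List.pyGet?, PySem.List.pyIdx?]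
  | a :: b :: t => simp

-- A's N-hydrogen if-cascade equals B's scalar formula (lists of length 2 or 3 reach it)
theorem ntail_eq (hn : List String) :
    (if hn.length = 0 ∨ hn.length > 2 then false
     else if hn.length = 1 then (if !hn.contains "H2" then false else true)
     else if !hn.contains "H" || !hn.contains "H2" then false else true)
    = ((hn.length == 1 && hn.contains "H2") || (hn.length == 2 && hn.contains "H" && hn.contains "H2")) := by
  match hn with
  | [] => simp
  | [x] =>
    by_cases hx : [x].contains "H2" = true <;> simp_all
  | [x, y] =>
    rcases Bool.eq_false_or_eq_true ([x, y].contains "H") with hH | hH <;>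
      rcases Bool.eq_false_or_eq_true ([x, y].contains "H2") with hH2 | hH2 <;>
        simp_all
  | x :: y :: z :: t =>
    rw [if_pos (by simp)]
    simp

-- Bool-atom bridges between B's Int counters and A's list tests
set_option maxHeartbeats 4000000 in
theorem ports_eq (tAtoms tBonds : List (List (String × String))) :
    confirmAAandNames tAtoms tBonds = confirmAAandNames_alt tAtoms tBonds := by
  have hB : (PySem.List.enumerate tAtoms 0).foldl bAtomStep (PySem.Dict.empty, ([] : List String))
      = ((tAtoms.foldl aAtomStep (PySem.Dict.empty, 0, [])).1,
         (tAtoms.foldl aAtomStep (PySem.Dict.empty, 0, [])).2.2) :=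
    atomLoop_eq tAtoms (PySem.Dict.empty, 0, [])
  have hmem : ∀ x ∈ (tAtoms.foldl aAtomStep (PySem.Dict.empty, 0, [])).2.2, x ∈ fiveNames :=
    base_mem tAtoms (PySem.Dict.empty, 0, []) (by intro x hx; simp at hx)
  simp only [confirmAAandNames, confirmAAandNames_alt]
  rw [hB]
  set tA := tAtoms.foldl aAtomStep (PySem.Dict.empty, 0, ([] : List String)) with htA
  by_cases hg : (tA.2.2.length == 5 && tA.2.2.contains "CA" && tA.2.2.contains "C"
      && tA.2.2.contains "O" && tA.2.2.contains "OXT" && tA.2.2.contains "N") = true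
  · -- A's first gate holds; so does B's sorted gate
    have hg' := hg
    simp only [Bool.and_eq_true, beq_iff_eq, List.contains_eq_mem, decide_eq_true_eq] at hg'
    obtain ⟨⟨⟨⟨⟨hlen5, hmCA⟩, hmC⟩, hmO⟩, hmOXT⟩, hmN⟩ := hg'
    have hsorted : PySem.List.sorted tA.2.2 (fun x => x) false = ["C", "CA", "N", "O", "OXT"] :=
      (gate_eq _ hmem).mpr ⟨hlen5, hmCA, hmC, hmO, hmOXT, hmN⟩
    rw [if_pos hg,
      if_neg (c := PySem.List.sorted tA.2.2 (fun x => x) false ≠ ["C", "CA", "N", "O", "OXT"])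
        (fun h => h hsorted)]
    have hget : ∀ k, k ∈ tA.2.2 →
        ((tA.2.2.foldl (fun al aAId => al.insert aAId (tBonds.foldl (aBondStep aAId) [])) PySem.Dict.empty).get? k).getD []
          = tBonds.foldl (aBondStep k) [] := by
      intro k hk
      rw [foldl_insert_get (fun a => tBonds.foldl (aBondStep a) [])]
      simp [hk]
    rw [hget "CA" hmCA, hget "C" hmC, hget "N" hmN]
    set LCA := tBonds.foldl (aBondStep "CA") [] with hLCA
    set LC := tBonds.foldl (aBondStep "C") [] with hLC
    set LN := tBonds.foldl (aBondStep "N") [] with hLN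
    have hst : tBonds.foldl (bBondStep tA.1 tAtoms) bStats0 = bondMeasure tA.1 tAtoms (LCA, LC, LN) := by
      have h0 : bStats0 = bondMeasure tA.1 tAtoms ([], [], []) := rfl
      rw [h0, bondLoop_measure]
    rw [hst]
    have hfold : ∀ l : List String,
        l.foldl (fun acc aId => if atomTypeAt tA.1 tAtoms aId == some "H"
          then acc ++ [atomNameAt tA.1 tAtoms aId] else acc) []
          = bHnames tA.1 tAtoms l := by
      intro l
      rw [PySem.List.foldl_append_if]
      simp [bHnames]
    rw [hfold, hfold]
    set Hca := bHnames tA.1 tAtoms LCA with hHca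
    set Hn := bHnames tA.1 tAtoms LN with hHn
    rw [lAA1_eq]
    -- B's scalar connectivity test equals A's list test
    have hch : ((bondMeasure tA.1 tAtoms (LCA, LC, LN)).caN ≠ 0
          && (bondMeasure tA.1 tAtoms (LCA, LC, LN)).caC ≠ 0
          && (bondMeasure tA.1 tAtoms (LCA, LC, LN)).caDeg == 4
          && (bondMeasure tA.1 tAtoms (LCA, LC, LN)).cO ≠ 0
          && (bondMeasure tA.1 tAtoms (LCA, LC, LN)).cOXT ≠ 0
          && (bondMeasure tA.1 tAtoms (LCA, LC, LN)).cDeg == 3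
          && ((bondMeasure tA.1 tAtoms (LCA, LC, LN)).nDeg == 2
              || (bondMeasure tA.1 tAtoms (LCA, LC, LN)).nDeg == 3))
        = (LCA.contains "N" && LCA.contains "C" && LCA.length == 4
          && LC.contains "O" && LC.contains "OXT" && LC.length == 3
          && (LN.length == 2 || LN.length == 3)) := by
      rw [Bool.eq_iff_iff]
      simp only [bondMeasure, Bool.and_eq_true, Bool.or_eq_true, beq_iff_eq, ne_eq,
        decide_eq_true_eq, List.contains_eq_mem, ← List.count_pos_iff]
      omega
    rw [hch]
    -- B's CA hydrogen test equals A's (as rewritten by lAA1_eq)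
    have hcab : (((bondMeasure tA.1 tAtoms (LCA, LC, LN)).caH == 1)
          && ((bondMeasure tA.1 tAtoms (LCA, LC, LN)).caHA == 1))
        = ((Hca.length == 1) && (Hca.count "HA" == 1)) := by
      rw [Bool.eq_iff_iff]
      simp only [bondMeasure, ← hHca, Bool.and_eq_true, beq_iff_eq]
      omega
    have hn3 : ((bondMeasure tA.1 tAtoms (LCA, LC, LN)).nDeg == 3) = (LN.length == 3) := by
      rw [Bool.eq_iff_iff]
      simp only [bondMeasure, beq_iff_eq]
      omega
    have hnf : (((bondMeasure tA.1 tAtoms (LCA, LC, LN)).nH == 1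
            && (bondMeasure tA.1 tAtoms (LCA, LC, LN)).nHasH2)
          || ((bondMeasure tA.1 tAtoms (LCA, LC, LN)).nH == 2
            && (bondMeasure tA.1 tAtoms (LCA, LC, LN)).nHasH
            && (bondMeasure tA.1 tAtoms (LCA, LC, LN)).nHasH2))
        = ((Hn.length == 1 && Hn.contains "H2")
          || (Hn.length == 2 && Hn.contains "H" && Hn.contains "H2")) := by
      rw [Bool.eq_iff_iff]
      simp only [bondMeasure, ← hHn, Bool.and_eq_true, Bool.or_eq_true, beq_iff_eq]
      constructor
      · rintro (⟨h1, h2⟩ | ⟨⟨h1, h2⟩, h3⟩)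
        · exact Or.inl ⟨by omega, h2⟩
        · exact Or.inr ⟨⟨by omega, h2⟩, h3⟩
      · rintro (⟨h1, h2⟩ | ⟨⟨h1, h2⟩, h3⟩)
        · exact Or.inl ⟨by omega, h2⟩
        · exact Or.inr ⟨⟨by omega, h2⟩, h3⟩
    rw [hcab, hn3, hnf]
    by_cases hg2 : (LCA.contains "N" && LCA.contains "C" && LCA.length == 4
        && LC.contains "O" && LC.contains "OXT" && LC.length == 3
        && (LN.length == 2 || LN.length == 3)) = true
    · -- A's connectivity gate holds
      have h23 : LN.length = 2 ∨ LN.length = 3 := by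
        have h' := hg2
        simp only [Bool.and_eq_true, Bool.or_eq_true, beq_iff_eq] at h'
        exact h'.2
      rw [hg2, if_pos rfl, if_neg (c := ((!true) = true)) (by decide)]
      by_cases hx : ((Hca.length == 1) && (Hca.count "HA" == 1)) = true
      · rw [hx, if_neg (c := ((!true) = true)) (by decide)]
        rcases h23 with h2 | h3
        · rw [h2]
          simp
        · rw [h3]
          rw [if_pos (c := (((3 : Nat) == 3) = true)) (by decide),
            if_pos (c := (((3 : Nat) == 3) = true)) (by decide)]
          exact ntail_eq Hn
      · have hx' : ((Hca.length == 1) && (Hca.count "HA" == 1)) = false :=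
          Bool.eq_false_iff.mpr hx
        rw [hx', if_pos (c := ((!false) = true)) (by decide)]
        rcases h23 with h2 | h3
        · rw [h2]
          simp
        · rw [h3, if_pos (c := (((3 : Nat) == 3) = true)) (by decide)]
          split_ifs <;> rfl
    · -- A's connectivity gate fails: both return false
      have hgf : (LCA.contains "N" && LCA.contains "C" && LCA.length == 4
          && LC.contains "O" && LC.contains "OXT" && LC.length == 3
          && (LN.length == 2 || LN.length == 3)) = false := Bool.eq_false_iff.mpr hg2
      rw [hgf, if_neg (c := (false = true)) (by decide), if_pos (c := ((!false) = true)) (by decide)]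
  · -- A's first gate fails: so does B's sorted gate
    rw [if_neg hg]
    have hnp : ¬ (tA.2.2.length = 5 ∧ "CA" ∈ tA.2.2 ∧ "C" ∈ tA.2.2 ∧ "O" ∈ tA.2.2
        ∧ "OXT" ∈ tA.2.2 ∧ "N" ∈ tA.2.2) := by
      intro ⟨h1, h2, h3, h4, h5, h6⟩
      exact hg (by simp [h1, h2, h3, h4, h5, h6])
    have hs : PySem.List.sorted tA.2.2 (fun x => x) false ≠ ["C", "CA", "N", "O", "OXT"] :=
      fun h => hnp ((gate_eq _ hmem).mp h)
    rw [if_pos hs]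

-- ===== VERDICT (by name: the statement is the Claim_ definition above) =====
theorem confirmAAandNames_spec : Claim_equal_confirmAAandNames := by
  intro tAtoms tBonds _ _
  unfold Spec_confirmAAandNames; exact ports_eq tAtoms tBonds
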